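-- pv_equiv track=rewrite | github.com/yz4004/codeforce-python | daily/problem_list/2025/1118.py | solve
-- ===== SOURCE A (Python) =====
-- import itertools
-- from bisect import bisect_left
-- import itertools, sys
-- from bisect import bisect_left
--
-- def solve(n, k):   # usage
--     # ...1
--     # ...10
--     # ...100
--
--     # 二进制指数 + 二分
--     # 注意到每次生成的数是 以 lowbit= 1, 10 100... 为单位 x*lb <= n 的所有奇数
--     # 所以第k个 先找对应的lowbit 再找对应lowbit内部的第几个 1 3 5 7 ... * lb
--     # 1010 = 10
--     # 1000
--     # _100
--     # __10
--     # ___1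
--
--     # 注意被4整除的同时也被2整除，所以倒叙要排除
--     tmp = []
--     for i in range(n.bit_length() - 1, -1, -1):
--         t = 1 << i
--         exclude = n // (1 << (i+1)) if 1 < n.bit_length() - i else 0
--         tmp.append(n // t - exclude)
--
--     tmp = tmp[::-1]
--     tmp = list(itertools.accumulate(tmp))
--     i = bisect_left(tmp, k)    # >= k 对应lowbit
--
--     pre = tmp[i-1] if i > 0 else 0 # 该lowbit 前面的计数
--
--     # 1<<i  1...t  =>  2k+1
--     # range(1, (n-1)//(1<<i)+2, 2)   k-pre  该lowbit内部的第 k-pre 个 1 3 5 7 ... 2*j-1 取 j= k-pre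
--
--     j = (k - pre) * 2 - 1
--     return j * (1 << i)
-- ===== SOURCE B (Python) =====
-- def solve(n, k):
--     # Single forward scan over lowbit classes with an early exit:
--     # no count table, no prefix-sum accumulation, no binary search.
--     bl = n.bit_length()
--     pre = 0
--     for i in range(bl):
--         cnt = n // (1 << i) - (n // (1 << (i + 1)) if i < bl - 1 else 0)
--         if pre + cnt >= k:
--             return ((k - pre) * 2 - 1) * (1 << i)
--         pre += cnt
--     return ((k - pre) * 2 - 1) * (1 << bl)
-- ===== Notes on version B (the rewrite author's own statement) =====
-- stated objective: simpler
-- what changed: Replaces the reversed count-table build + itertools.accumulate + bisect_left binary search with one forward loop over bit positions keeping a running prefix count and returning at the first class that reaches k.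
-- outside the precondition, e.g. on solve(-4, -2): A returns 24, B returns -5
import Mathlib
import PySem

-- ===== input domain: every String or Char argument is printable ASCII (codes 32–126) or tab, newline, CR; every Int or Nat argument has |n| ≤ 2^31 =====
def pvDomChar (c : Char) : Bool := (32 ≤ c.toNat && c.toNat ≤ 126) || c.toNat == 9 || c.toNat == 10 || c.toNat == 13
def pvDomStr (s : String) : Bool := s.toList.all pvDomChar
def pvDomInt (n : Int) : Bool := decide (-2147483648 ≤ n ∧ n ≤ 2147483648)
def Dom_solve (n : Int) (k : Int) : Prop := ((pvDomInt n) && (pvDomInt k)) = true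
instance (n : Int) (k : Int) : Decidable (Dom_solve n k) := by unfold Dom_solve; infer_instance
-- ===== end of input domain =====

-- B replaces A's build-table + accumulate + bisect by one forward scan with an early exit (simpler decomposition, same cost).

-- ===== PORT A =====
-- itertools.accumulate(xs) with running sum acc
def pyAccumulate : List Int → Int → List Int
  | [], _ => []
  | x :: xs, acc => (acc + x) :: pyAccumulate xs (acc + x)

def solve (n : Int) (k : Int) : Int :=
  let bl : Nat := PySem.Int.bitLength n
  -- for i in range(bl-1, -1, -1): tmp.append(n // (1<<i) - exclude)
  let tmp : List Int :=
    (PySem.List.pyRange ((bl : Int) - 1) (-1) (-1)).foldl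
      (fun acc i =>
        let t : Int := 2 ^ i.toNat
        let exclude : Int :=
          if 1 < (bl : Int) - i then PySem.Int.floordiv n (2 ^ (i + 1).toNat) else 0
        acc ++ [PySem.Int.floordiv n t - exclude]) []
  let tmp := tmp.reverse                    -- tmp[::-1]
  let tmp := pyAccumulate tmp 0             -- list(itertools.accumulate(tmp))
  let i : Nat := PySem.List.bisectLeft tmp k
  let pre : Int := if i > 0 then tmp.getD (i - 1) 0 else 0   -- tmp[i-1]: in range when i > 0
  let j : Int := (k - pre) * 2 - 1
  j * 2 ^ i

-- ===== PORT B =====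
def solveAltLoop (n k : Int) (bl : Nat) (i : Nat) (pre : Int) : Int :=
  if _h : i < bl then
    let cnt : Int := PySem.Int.floordiv n (2 ^ i) -
      (if i < bl - 1 then PySem.Int.floordiv n (2 ^ (i + 1)) else 0)
    if pre + cnt ≥ k then ((k - pre) * 2 - 1) * 2 ^ i
    else solveAltLoop n k bl (i + 1) (pre + cnt)
  else ((k - pre) * 2 - 1) * 2 ^ bl
termination_by bl - i

def solve_alt (n : Int) (k : Int) : Int :=
  solveAltLoop n k (PySem.Int.bitLength n) 0 0

-- ===== PRECONDITION & SPEC =====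
-- Pre_ excludes negative n: there A's count list is not sorted, so bisect_left's
-- binary-search answer is an accident of probe order; B's linear scan is equally defensible there.
def Pre_solve (n : Int) (_k : Int) : Prop := 0 ≤ n
instance (n : Int) (k : Int) : Decidable (Pre_solve n k) := by unfold Pre_solve; infer_instance
def pvWitness_solve : Int × Int := (10, 3)

def Spec_solve (n : Int) (k : Int) (out : Int) : Prop := out = solve_alt n k
instance (n : Int) (k : Int) (out : Int) : Decidable (Spec_solve n k out) := by unfold Spec_solve; infer_instance

-- ===== CLAIM (what is proved, stated in full; the proofs are below) =====
def Claim_equal_solve : Prop := ∀ (n : Int) (k : Int), Dom_solve n k → Pre_solve n k → Spec_solve n k (solve n k)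

-- ===== LEMMAS AND PROOFS =====

-- the per-class count and the accumulated prefix (n ≥ 0 makes the top-entry 'exclude 0' equal to n // 2^bl = 0)
def pvCnt (n : Int) (j : Nat) : Int := PySem.Int.floordiv n (2 ^ j) - PySem.Int.floordiv n (2 ^ (j + 1))
def pvAcc (n : Int) (j : Nat) : Int := n - PySem.Int.floordiv n (2 ^ j)

theorem floordiv_one (n : Int) : PySem.Int.floordiv n 1 = n := by
  rw [PySem.Int.floordiv_eq_ediv_of_pos (by norm_num)]; exact Int.ediv_one n

theorem floordiv_pow_bitLength (n : Int) (hn : 0 ≤ n) (b : Nat)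
    (hb : PySem.Int.bitLength n ≤ b) : PySem.Int.floordiv n (2 ^ b) = 0 := by
  rw [PySem.Int.floordiv_eq_ediv_of_pos (by positivity)]
  apply Int.ediv_eq_zero_of_lt hn
  have h1 : n.natAbs < 2 ^ PySem.Int.bitLength n := PySem.Int.lt_two_pow_bitLength n
  have h2 : (2:Nat) ^ PySem.Int.bitLength n ≤ 2 ^ b := Nat.pow_le_pow_right (by norm_num) hb
  have h3 : n.natAbs < 2 ^ b := lt_of_lt_of_le h1 h2
  have h4 : ((2:Nat) ^ b : Int) = (2:Int) ^ b := by push_cast; ring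
  omega

theorem floordiv_pow_antitone (n : Int) (hn : 0 ≤ n) {a b : Nat} (h : a ≤ b) :
    PySem.Int.floordiv n (2 ^ b) ≤ PySem.Int.floordiv n (2 ^ a) := by
  rw [PySem.Int.floordiv_eq_ediv_of_pos (by positivity),
      PySem.Int.floordiv_eq_ediv_of_pos (by positivity)]
  lift n to Nat using hn
  have : (n : Int) / (2 ^ b : Nat) ≤ (n : Int) / (2 ^ a : Nat) := by
    have hnn : n / 2 ^ b ≤ n / 2 ^ a :=
      Nat.div_le_div_left (Nat.pow_le_pow_right (by norm_num) h) (Nat.two_pow_pos a)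
    exact_mod_cast hnn
  simpa using this

theorem pvAcc_mono (n : Int) (hn : 0 ≤ n) {a b : Nat} (h : a ≤ b) : pvAcc n a ≤ pvAcc n b := by
  unfold pvAcc; have := floordiv_pow_antitone n hn h; omega

theorem pyAccumulate_append (xs : List Int) (x a : Int) :
    pyAccumulate (xs ++ [x]) a = pyAccumulate xs a ++ [a + xs.sum + x] := by
  induction xs generalizing a with
  | nil => simp [pyAccumulate]
  | cons y ys ih => simp [pyAccumulate, ih (a + y)]; ring_nf

theorem sum_pvCnt (n : Int) (t : Nat) :
    ((List.range t).map (pvCnt n)).sum = n - PySem.Int.floordiv n (2 ^ t) := by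
  induction t with
  | zero => simp
  | succ t ih => rw [List.range_succ]; simp [ih, pvCnt]  -- telescopes

theorem pyAccumulate_pvCnt (n : Int) (t : Nat) :
    pyAccumulate ((List.range t).map (pvCnt n)) 0 = (List.range t).map (fun j => pvAcc n (j + 1)) := by
  induction t with
  | zero => simp [pyAccumulate]
  | succ t ih =>
      rw [List.range_succ, List.map_append]
      simp only [List.map_cons, List.map_nil]
      rw [pyAccumulate_append, ih]
      simp only [List.map_append, List.map_cons, List.map_nil, sum_pvCnt, pvCnt, pvAcc]
      congr 1
      simp

-- A's raw count list equals the map of pvCnt (after reversing), for n ≥ 0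
theorem solve_tmp_eq (n : Int) (hn : 0 ≤ n) :
    (((PySem.List.pyRange ((PySem.Int.bitLength n : Int) - 1) (-1) (-1)).foldl
        (fun acc i =>
          acc ++ [PySem.Int.floordiv n (2 ^ i.toNat) -
            (if 1 < (PySem.Int.bitLength n : Int) - i then PySem.Int.floordiv n (2 ^ (i + 1).toNat) else 0)]) []).reverse)
      = (List.range (PySem.Int.bitLength n)).map (pvCnt n) := by
  rw [PySem.List.pyRange_neg_one_eq_reverse, PySem.List.foldl_append_singleton_eq_map]
  have e3 : ((PySem.Int.bitLength n : Int) - 1) + 1 = (PySem.Int.bitLength n : Int) := by ring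
  have e2 : (-1 : Int) + 1 = 0 := by norm_num
  rw [e2, e3, PySem.List.pyRange_zero_nat, List.nil_append, List.map_reverse,
      List.reverse_reverse, List.map_map]
  refine List.map_congr_left ?_
  intro j hj
  have hjlt : j < PySem.Int.bitLength n := List.mem_range.mp hj
  simp only [Function.comp]
  have ht1 : ((j : Int)).toNat = j := Int.toNat_natCast j
  have ht2 : ((j : Int) + 1).toNat = j + 1 := by omega
  rw [ht1, ht2]
  unfold pvCnt
  by_cases hc : j + 1 < PySem.Int.bitLength n
  · have : 1 < (PySem.Int.bitLength n : Int) - (j : Int) := by omega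
    rw [if_pos this]
  · have : ¬ (1 < (PySem.Int.bitLength n : Int) - (j : Int)) := by omega
    rw [if_neg this, floordiv_pow_bitLength n hn (j + 1) (by omega)]

theorem solveAltLoop_eq (n k : Int) (hn : 0 ≤ n) (ib : Nat)
    (hib : ib ≤ PySem.Int.bitLength n)
    (hlow : ∀ j, j < ib → pvAcc n (j + 1) < k)
    (hhigh : ∀ j, ib ≤ j → j < PySem.Int.bitLength n → k ≤ pvAcc n (j + 1)) :
    ∀ i, i ≤ ib → solveAltLoop n k (PySem.Int.bitLength n) i (pvAcc n i) =
      ((k - pvAcc n ib) * 2 - 1) * 2 ^ ib := by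
  intro i hi
  induction hd : ib - i generalizing i with
  | zero =>
      -- i = ib: either the loop returns here or (ib = bl) drops out of the loop
      have hieq : i = ib := by omega
      subst hieq
      rw [solveAltLoop]
      by_cases hbl : i < PySem.Int.bitLength n
      · rw [dif_pos hbl]
        have hcnt : pvAcc n i +
            (PySem.Int.floordiv n (2 ^ i) -
              (if i < PySem.Int.bitLength n - 1 then PySem.Int.floordiv n (2 ^ (i + 1)) else 0))
            = pvAcc n (i + 1) := by
          by_cases hc : i < PySem.Int.bitLength n - 1
          · rw [if_pos hc]; unfold pvAcc; ring
          · rw [if_neg hc]; unfold pvAcc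
            rw [floordiv_pow_bitLength n hn (i + 1) (by omega)]; ring
        have hge : k ≤ pvAcc n (i + 1) := hhigh i (le_refl i) hbl
        simp only [hcnt]
        rw [if_pos (by omega)]
      · rw [dif_neg hbl]
        have : PySem.Int.bitLength n = i := by omega
        rw [this]
  | succ d ihd =>
      have hlt : i < ib := by omega
      have hbl : i < PySem.Int.bitLength n := by omega
      rw [solveAltLoop, dif_pos hbl]
      have hcnt : pvAcc n i +
          (PySem.Int.floordiv n (2 ^ i) -
            (if i < PySem.Int.bitLength n - 1 then PySem.Int.floordiv n (2 ^ (i + 1)) else 0))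
          = pvAcc n (i + 1) := by
        by_cases hc : i < PySem.Int.bitLength n - 1
        · rw [if_pos hc]; unfold pvAcc; ring
        · rw [if_neg hc]; unfold pvAcc
          rw [floordiv_pow_bitLength n hn (i + 1) (by omega)]; ring
      have hlow' : pvAcc n (i + 1) < k := hlow i hlt
      simp only [hcnt]
      rw [if_neg (by omega)]
      exact ihd (i + 1) (by omega) (by omega)

theorem solve_eq_alt (n k : Int) (hn : 0 ≤ n) : solve n k = solve_alt n k := by
  simp only [solve, solve_alt]
  rw [solve_tmp_eq n hn, pyAccumulate_pvCnt]
  have hlen : ((List.range (PySem.Int.bitLength n)).map (fun j => pvAcc n (j + 1))).length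
      = PySem.Int.bitLength n := by simp
  have hsorted : ((List.range (PySem.Int.bitLength n)).map (fun j => pvAcc n (j + 1))).Pairwise (· ≤ ·) := by
    refine List.Pairwise.map _ ?_ (List.pairwise_lt_range)
    intro a b hab
    exact pvAcc_mono n hn (by omega)
  obtain ⟨hle, hltk, hgek⟩ := PySem.List.bisectLeft_spec _ k hsorted
  set L := (List.range (PySem.Int.bitLength n)).map (fun j => pvAcc n (j + 1)) with hL
  set ib := PySem.List.bisectLeft L k with hib
  have hible : ib ≤ PySem.Int.bitLength n := by rw [hlen] at hle; exact hle
  have hLget : ∀ j (hj : j < PySem.Int.bitLength n), L[j]'(by rw [hlen]; exact hj) = pvAcc n (j + 1) := by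
    intro j hj; simp [hL]
  have hlow : ∀ j, j < ib → pvAcc n (j + 1) < k := by
    intro j hj
    have hjl : j < L.length := by omega
    have := hltk j hjl hj
    rwa [hLget j (by omega)] at this
  have hhigh : ∀ j, ib ≤ j → j < PySem.Int.bitLength n → k ≤ pvAcc n (j + 1) := by
    intro j h1 h2
    have hjl : j < L.length := by omega
    have := hgek j hjl h1
    rwa [hLget j h2] at this
  have hpre : (if ib > 0 then L.getD (ib - 1) 0 else 0) = pvAcc n ib := by
    by_cases h0 : ib > 0
    · rw [if_pos h0]
      have hidx : ib - 1 < L.length := by omega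
      rw [List.getD_eq_getElem L 0 hidx, hLget (ib - 1) (by omega)]
      congr 1
      omega
    · rw [if_neg h0]
      have : ib = 0 := by omega
      rw [this]
      unfold pvAcc
      rw [pow_zero, floordiv_one]
      ring
  rw [hpre]
  have hzero : (0 : Int) = pvAcc n 0 := by
    unfold pvAcc; rw [pow_zero, floordiv_one]; ring
  rw [hzero]
  rw [solveAltLoop_eq n k hn ib hible hlow hhigh 0 (Nat.zero_le ib)]

-- ===== VERDICT (by name: the statement is the Claim_ definition above) =====
theorem solve_spec : Claim_equal_solve := by
  intro n k _ hpre
  unfold Spec_solve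
  exact solve_eq_alt n k hpre
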